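-- pv_equiv track=rewrite | github.com/jedward225/embodied_reasoner | spatial_enhancement/vlm_response_parser.py | get_optimal_sorting_strategy
-- ===== SOURCE A (Python) =====
-- def get_optimal_sorting_strategy(instruction: str) -> str:
--     """Get the optimal sorting strategy based on instruction.
--
--     Args:
--         instruction: The instruction text
--
--     Returns:
--         Name of the optimal sorting strategy
--     """
--     instruction_lower = instruction.lower()
--
--     if any(word in instruction_lower for word in ['left', 'right', 'beside', 'next']):
--         return 'spatial_left_to_right'
--     elif any(word in instruction_lower for word in ['near', 'close', 'closest']):
--         return 'distance_based'
--     elif any(word in instruction_lower for word in ['visible', 'see', 'look']):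
--         return 'visibility_based'
--     else:
--         return 'default'
-- ===== SOURCE B (Python) =====
-- KEYWORDS = [
--     ('left', 0), ('right', 0), ('beside', 0), ('next', 0),
--     ('near', 1), ('close', 1), ('closest', 1),
--     ('visible', 2), ('see', 2), ('look', 2),
-- ]
--
-- STRATEGIES = ['spatial_left_to_right', 'distance_based', 'visibility_based']
--
--
-- def get_optimal_sorting_strategy(instruction: str) -> str:
--     """Single left-to-right scan over the instruction: at each position,
--     check which keywords start there and keep the best (lowest) priority
--     seen so far, stopping early once priority 0 is reached."""
--     s = instruction.lower()
--     best = 3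
--     for i in range(len(s)):
--         for kw, pri in KEYWORDS:
--             if pri < best and s.startswith(kw, i):
--                 best = pri
--         if best == 0:
--             break
--     return STRATEGIES[best] if best < 3 else 'default'
-- ===== Notes on version B (the rewrite author's own statement) =====
-- stated objective: alternative
-- what changed: Instead of three staged any(substring in s) membership passes, B makes a single left-to-right scan over the string positions, testing startswith for each prioritised keyword at each position and keeping the minimum priority seen (with early exit on priority 0).
import Mathlib
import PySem

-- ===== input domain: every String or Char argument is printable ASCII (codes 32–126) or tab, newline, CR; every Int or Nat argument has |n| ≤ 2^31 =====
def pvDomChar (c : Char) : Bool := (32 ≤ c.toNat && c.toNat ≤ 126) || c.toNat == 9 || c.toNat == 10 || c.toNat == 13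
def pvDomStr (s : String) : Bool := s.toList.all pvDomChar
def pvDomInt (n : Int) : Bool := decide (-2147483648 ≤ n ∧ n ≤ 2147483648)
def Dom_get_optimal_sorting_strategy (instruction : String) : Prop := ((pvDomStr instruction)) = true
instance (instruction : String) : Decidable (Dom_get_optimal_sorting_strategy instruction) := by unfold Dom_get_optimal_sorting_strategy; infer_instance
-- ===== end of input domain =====

-- B replaces A's three staged substring-membership passes by a single left-to-right
-- position scan keeping the minimum keyword priority (alternative algorithm, same cost).


-- ===== PORT A =====
def get_optimal_sorting_strategy (instruction : String) : String :=
  let instruction_lower := PySem.Str.lower instruction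
  if ["left", "right", "beside", "next"].any (fun word => PySem.Str.isIn word instruction_lower) then
    "spatial_left_to_right"
  else if ["near", "close", "closest"].any (fun word => PySem.Str.isIn word instruction_lower) then
    "distance_based"
  else if ["visible", "see", "look"].any (fun word => PySem.Str.isIn word instruction_lower) then
    "visibility_based"
  else
    "default"

-- ===== PORT B =====
-- Source B's KEYWORDS table: (keyword, priority)
def pvKeywords : List (List Char × Nat) :=
  [("left".toList, 0), ("right".toList, 0), ("beside".toList, 0), ("next".toList, 0),
   ("near".toList, 1), ("close".toList, 1), ("closest".toList, 1),
   ("visible".toList, 2), ("see".toList, 2), ("look".toList, 2)]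

def pvStrategies : List String := ["spatial_left_to_right", "distance_based", "visibility_based"]

-- Source B's scan loop: outer loop over positions i (here: suffixes of the char list),
-- inner loop over KEYWORDS updating `best`, breaking once best = 0
def pvScan : List Char → Nat → Nat
  | [], best => best
  | c :: rest, best =>
    let best' := pvKeywords.foldl
      (fun b p => if decide (p.2 < b) && PySem.Chars.startswith (c :: rest) p.1 then p.2 else b) best
    if best' = 0 then 0 else pvScan rest best'

def get_optimal_sorting_strategy_alt (instruction : String) : String :=
  let s := (PySem.Str.lower instruction).toList
  let best := pvScan s 3
  if best < 3 then pvStrategies.getD best "default" else "default"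

-- ===== PRECONDITION & SPEC =====
def Spec_get_optimal_sorting_strategy (instruction : String) (out : String) : Prop := out = get_optimal_sorting_strategy_alt instruction
instance (instruction : String) (out : String) : Decidable (Spec_get_optimal_sorting_strategy instruction out) := by unfold Spec_get_optimal_sorting_strategy; infer_instance

-- ===== CLAIM (what is proved, stated in full; the proofs are below) =====
def Claim_equal_get_optimal_sorting_strategy : Prop := ∀ (instruction : String), Dom_get_optimal_sorting_strategy instruction → Spec_get_optimal_sorting_strategy instruction (get_optimal_sorting_strategy instruction)

-- ===== LEMMAS AND PROOFS =====

-- whether some keyword of a given priority group occurs as a substring of s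
def pvHit (ws : List (List Char)) (s : List Char) : Bool :=
  ws.any (fun w => PySem.Chars.isIn w s)

-- whether some keyword of a group starts at the head position of s
def pvSw (ws : List (List Char)) (s : List Char) : Bool :=
  ws.any (fun w => PySem.Chars.startswith s w)

def pvG0 : List (List Char) := ["left".toList, "right".toList, "beside".toList, "next".toList]
def pvG1 : List (List Char) := ["near".toList, "close".toList, "closest".toList]
def pvG2 : List (List Char) := ["visible".toList, "see".toList, "look".toList]

-- first-matching-group priority, looking only at the head position of s
def pvHead (s : List Char) : Nat :=
  if pvSw pvG0 s then 0 else if pvSw pvG1 s then 1 else if pvSw pvG2 s then 2 else 3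

-- first-matching-group priority over the whole string
def pvMp (s : List Char) : Nat :=
  if pvHit pvG0 s then 0 else if pvHit pvG1 s then 1 else if pvHit pvG2 s then 2 else 3

-- a single priority group's inner-loop fold takes min with its priority when any keyword starts here
theorem pvGroupFold (s : List Char) (p : Nat) (ws : List (List Char)) (b : Nat) :
    (ws.map (fun w => (w, p))).foldl
      (fun b q => if decide (q.2 < b) && PySem.Chars.startswith s q.1 then q.2 else b) b
    = if p < b ∧ pvSw ws s then p else b := by
  induction ws generalizing b with
  | nil => simp [pvSw]
  | cons w ws ih =>
    simp only [List.map_cons, List.foldl_cons, ih, pvSw, List.any_cons]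
    by_cases hw : PySem.Chars.startswith s w = true <;>
      by_cases hp : p < b <;>
      simp [hw, hp]

theorem pvInnerFold (s : List Char) (b : Nat) (hb : b ≤ 3) :
    pvKeywords.foldl
      (fun b q => if decide (q.2 < b) && PySem.Chars.startswith s q.1 then q.2 else b) b
    = min b (pvHead s) := by
  have hsplit : pvKeywords
      = (pvG0.map (fun w => (w, 0))) ++ (pvG1.map (fun w => (w, 1))) ++ (pvG2.map (fun w => (w, 2))) := by
    rfl
  rw [hsplit, List.foldl_append, List.foldl_append, pvGroupFold, pvGroupFold, pvGroupFold,
    pvHead]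
  by_cases h0 : pvSw pvG0 s = true <;> by_cases h1 : pvSw pvG1 s = true <;>
    by_cases h2 : pvSw pvG2 s = true <;> simp [h0, h1, h2, min_def] <;> (try split_ifs) <;> omega

-- occurrence in c :: rest = occurrence at the head, or occurrence in rest
theorem pvHit_cons (ws : List (List Char)) (c : Char) (rest : List Char) :
    pvHit ws (c :: rest) = (pvSw ws (c :: rest) || pvHit ws rest) := by
  rw [Bool.eq_iff_iff]
  simp only [pvHit, pvSw, List.any_eq_true, Bool.or_eq_true]
  constructor
  · rintro ⟨w, hw, hin⟩
    rcases List.infix_cons_iff.mp ((PySem.Chars.isIn_iff_infix _ _).mp hin) with h | h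
    · exact Or.inl ⟨w, hw, (PySem.Chars.startswith_iff _ _).mpr h⟩
    · exact Or.inr ⟨w, hw, (PySem.Chars.isIn_iff_infix _ _).mpr h⟩
  · rintro (⟨w, hw, h⟩ | ⟨w, hw, h⟩)
    · exact ⟨w, hw, (PySem.Chars.isIn_iff_infix _ _).mpr
        (List.infix_cons_iff.mpr (Or.inl ((PySem.Chars.startswith_iff _ _).mp h)))⟩
    · exact ⟨w, hw, (PySem.Chars.isIn_iff_infix _ _).mpr
        (List.infix_cons_iff.mpr (Or.inr ((PySem.Chars.isIn_iff_infix _ _).mp h)))⟩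

theorem pvHit_nil_G0 : pvHit pvG0 [] = false := by decide
theorem pvHit_nil_G1 : pvHit pvG1 [] = false := by decide
theorem pvHit_nil_G2 : pvHit pvG2 [] = false := by decide

theorem pvMp_cons (c : Char) (rest : List Char) :
    pvMp (c :: rest) = min (pvHead (c :: rest)) (pvMp rest) := by
  simp only [pvMp, pvHead, pvHit_cons]
  by_cases h0 : pvSw pvG0 (c :: rest) = true <;> by_cases h1 : pvSw pvG1 (c :: rest) = true <;>
    by_cases h2 : pvSw pvG2 (c :: rest) = true <;>
    by_cases k0 : pvHit pvG0 rest = true <;> by_cases k1 : pvHit pvG1 rest = true <;>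
    by_cases k2 : pvHit pvG2 rest = true <;>
    simp [h0, h1, h2, k0, k1, k2]

theorem pvMp_le (s : List Char) : pvMp s ≤ 3 := by
  unfold pvMp; split_ifs <;> omega

theorem pvHead_le (s : List Char) : pvHead s ≤ 3 := by
  unfold pvHead; split_ifs <;> omega

-- the scan computes the first-matching-group priority
theorem pvScan_eq (s : List Char) : ∀ b, b ≤ 3 → pvScan s b = min b (pvMp s) := by
  induction s with
  | nil =>
    intro b hb
    simp only [pvScan, pvMp, pvHit_nil_G0, pvHit_nil_G1, pvHit_nil_G2]
    simp; omega
  | cons c rest ih =>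
    intro b hb
    rw [pvScan, pvInnerFold _ b hb, pvMp_cons]
    have hh := pvHead_le (c :: rest)
    have hm := pvMp_le rest
    by_cases h : min b (pvHead (c :: rest)) = 0
    · simp [h]; omega
    · simp only [h, if_false]
      rw [ih _ (by omega)]
      omega

theorem get_optimal_sorting_strategy_spec : Claim_equal_get_optimal_sorting_strategy := by
  intro instruction _
  simp only [Spec_get_optimal_sorting_strategy, get_optimal_sorting_strategy,
    get_optimal_sorting_strategy_alt]
  rw [pvScan_eq _ 3 (by omega)]
  have hm := pvMp_le (PySem.Str.lower instruction).toList
  have hmin : min 3 (pvMp (PySem.Str.lower instruction).toList)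
      = pvMp (PySem.Str.lower instruction).toList := by omega
  rw [hmin]
  simp only [pvMp, pvHit, pvG0, pvG1, pvG2, List.any_cons, List.any_nil]
  simp only [← PySem.Str.isIn_eq]
  by_cases h0 : (["left", "right", "beside", "next"] : List String).any
      (fun w => PySem.Str.isIn w (PySem.Str.lower instruction)) = true <;>
  by_cases h1 : (["near", "close", "closest"] : List String).any
      (fun w => PySem.Str.isIn w (PySem.Str.lower instruction)) = true <;>
  by_cases h2 : (["visible", "see", "look"] : List String).any
      (fun w => PySem.Str.isIn w (PySem.Str.lower instruction)) = true <;>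
  simp_all [pvStrategies]
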